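-- pv_equiv track=rewrite | github.com/miliar/Code_Jam_Webscraper | solutions_python/solutions_year17_round0_nr3/1686.py | left_right_stalls
-- ===== SOURCE A (Python) =====
-- from collections import defaultdict
--
-- def partition(n):
-- 	if n%2 == 0:
-- 		return n//2, n//2 - 1
-- 	else:
-- 		return (n-1)//2, (n-1)//2
--
-- def left_right_stalls(n,k ):
-- 	left_right_dict = defaultdict(int)
-- 	left_right_dict[n] = 1
--
-- 	for i in range(k):
-- 		choosen = max(left_right_dict.keys())
-- 		left_right_dict[choosen] -= 1
--
-- 		if left_right_dict[choosen] == 0: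
-- 			del left_right_dict[choosen]
--
-- 		ls, rs = partition(choosen)
-- 		left_right_dict[ls] += 1
-- 		left_right_dict[rs] += 1
-- 	return ls,rs
-- ===== SOURCE B (Python) =====
-- def left_right_stalls(n, k):
--     # Batch version: process all stalls of the current maximal size at once.
--     counts = {n: 1}
--     return _solve(counts, k)
--
-- def _solve(counts, k):
--     m = max(counts)
--     c = counts.pop(m)
--     if k <= c or m <= 0:
--         return m // 2, (m - 1) // 2
--     ls, rs = m // 2, (m - 1) // 2
--     counts[ls] = counts.get(ls, 0) + c
--     counts[rs] = counts.get(rs, 0) + c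
--     return _solve(counts, k - c)
-- ===== Notes on version B (the rewrite author's own statement) =====
-- stated objective: faster
-- what changed: Instead of re-splitting one largest gap per step for k steps (each step scanning the dict for its max), B pops the maximal size once and processes all c equal-size gaps of that level as one batch, counting the whole group against k, so the loop runs once per distinct size instead of k times.
-- outside the precondition, e.g. on left_right_stalls(-2, 2): A returns (-1, -1), B returns (-1, -2)
import Mathlib
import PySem

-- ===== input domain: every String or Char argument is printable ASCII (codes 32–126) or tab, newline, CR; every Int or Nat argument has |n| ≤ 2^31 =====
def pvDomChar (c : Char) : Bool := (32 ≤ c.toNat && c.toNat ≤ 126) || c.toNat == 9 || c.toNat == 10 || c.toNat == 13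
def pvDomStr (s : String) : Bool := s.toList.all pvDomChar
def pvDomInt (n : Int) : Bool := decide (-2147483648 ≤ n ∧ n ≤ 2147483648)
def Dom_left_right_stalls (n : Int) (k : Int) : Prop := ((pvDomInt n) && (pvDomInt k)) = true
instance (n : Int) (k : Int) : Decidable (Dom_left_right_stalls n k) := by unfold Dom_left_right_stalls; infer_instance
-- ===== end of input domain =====

-- B replaces A's one-split-per-step loop (k iterations, each taking the max) by batch-processing
-- all stalls of the current maximal size at once, recursing once per distinct size level (faster).

-- ===== PORT A =====

-- helper partition(n) of A
def partitionA (m : Int) : Int × Int :=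
  if PySem.Int.mod m 2 == 0 then (PySem.Int.floordiv m 2, PySem.Int.floordiv m 2 - 1)
  else (PySem.Int.floordiv (m - 1) 2, PySem.Int.floordiv (m - 1) 2)

-- one iteration of A's `for i in range(k)` body; the second component is the (ls, rs) variable
-- pair (none before the first iteration — Python would raise UnboundLocalError at the return).
-- Python's max() on an empty dict would raise; the dict is never empty, the none-branch keeps state.
def stepA (s : PySem.Dict Int Int × Option (Int × Int)) : PySem.Dict Int Int × Option (Int × Int) :=
  match PySem.List.max? s.1.keys (fun x => x) with
  | none => s
  | some choosen =>
      let d1 := s.1.insert choosen (s.1.getD choosen 0 - 1)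
      let d2 := if d1.getD choosen 0 == 0 then d1.erase choosen else d1
      let p := partitionA choosen
      let d3 := d2.insert p.1 (d2.getD p.1 0 + 1)
      let d4 := d3.insert p.2 (d3.getD p.2 0 + 1)
      (d4, some p)

def left_right_stalls (n : Int) (k : Int) : List Int :=
  let init : PySem.Dict Int Int × Option (Int × Int) := (PySem.Dict.empty.insert n 1, none)
  match ((PySem.List.pyRange 0 k 1).foldl (fun s _ => stepA s) init).2 with
  | some p => [p.1, p.2]
  | none => []   -- Python raises UnboundLocalError here (k ≤ 0: loop body never ran); outside Pre_

-- ===== PORT B =====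

-- recursive batch loop of Source B (`_solve`); fuel only makes the recursion structural:
-- k decreases by c ≥ 1 at every recursive call, so fuel = k.toNat + 1 is never exhausted.
def solveB : Nat → PySem.Dict Int Int → Int → List Int
  | 0, _, _ => []
  | fuel + 1, counts, k =>
    match PySem.List.max? counts.keys (fun x => x) with
    | none => []   -- Python max() would raise on an empty dict; never reached
    | some m =>
      let c := counts.getD m 0        -- c = counts.pop(m)
      let counts := counts.erase m
      if k ≤ c ∨ m ≤ 0 then [PySem.Int.floordiv m 2, PySem.Int.floordiv (m - 1) 2]
      else
        let ls := PySem.Int.floordiv m 2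
        let rs := PySem.Int.floordiv (m - 1) 2
        let counts := counts.insert ls (counts.getD ls 0 + c)
        let counts := counts.insert rs (counts.getD rs 0 + c)
        solveB fuel counts (k - c)

def left_right_stalls_alt (n : Int) (k : Int) : List Int :=
  solveB (k.toNat + 1) (PySem.Dict.empty.insert n 1) k

-- ===== PRECONDITION & SPEC =====
-- Pre_ excludes k ≤ 0, where A raises UnboundLocalError (the loop body never assigns ls, rs),
-- and n < 0 (a negative stall count, outside the task's natural domain), where A still returns
-- a value produced by splitting negative "gaps".
def Pre_left_right_stalls (n : Int) (k : Int) : Prop := 0 ≤ n ∧ 1 ≤ k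
instance (n : Int) (k : Int) : Decidable (Pre_left_right_stalls n k) := by unfold Pre_left_right_stalls; infer_instance
def pvWitness_left_right_stalls : Int × Int := (7, 3)

def Spec_left_right_stalls (n : Int) (k : Int) (out : List Int) : Prop := out = left_right_stalls_alt n k
instance (n : Int) (k : Int) (out : List Int) : Decidable (Spec_left_right_stalls n k out) := by unfold Spec_left_right_stalls; infer_instance

-- ===== CLAIM (what is proved, stated in full; the proofs are below) =====
def Claim_equal_left_right_stalls : Prop := ∀ (n : Int) (k : Int), Dom_left_right_stalls n k → Pre_left_right_stalls n k → Spec_left_right_stalls n k (left_right_stalls n k)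

-- ===== LEMMAS AND PROOFS =====

-- proof-side abbreviations
def maxK (d : PySem.Dict Int Int) : Option Int := PySem.List.max? d.keys (fun x => x)
def sd (d : PySem.Dict Int Int) : PySem.Dict Int Int := (stepA (d, none)).1

-- extensional invariant of every dictionary either program reaches (from n ≥ 0):
-- nonempty, every multiplicity ≥ 1, every key ≥ -1
def DInv (d : PySem.Dict Int Int) : Prop :=
  (∃ x, (d.get? x).isSome) ∧ (∀ x v, d.get? x = some v → 1 ≤ v ∧ -1 ≤ x)

-- pointwise description of one A-step: g2 after the decrement/erase of the chosen key,
-- g3 after the ls bump, g4 after the rs bump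
def g2 (d : PySem.Dict Int Int) (m x : Int) : Option Int :=
  if x = m then (if d.getD m 0 - 1 = 0 then none else some (d.getD m 0 - 1)) else d.get? x
def g3 (d : PySem.Dict Int Int) (m x : Int) : Option Int :=
  if x = PySem.Int.floordiv m 2 then some ((g2 d m (PySem.Int.floordiv m 2)).getD 0 + 1) else g2 d m x
def g4 (d : PySem.Dict Int Int) (m x : Int) : Option Int :=
  if x = PySem.Int.floordiv (m - 1) 2 then some ((g3 d m (PySem.Int.floordiv (m - 1) 2)).getD 0 + 1) else g3 d m x

-- the dict B builds in one batch step (m removed, ls/rs bumped by c); literally the dict of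
-- solveB's recursive call
def batchD (d : PySem.Dict Int Int) (m c : Int) : PySem.Dict Int Int :=
  ((d.erase m).insert (PySem.Int.floordiv m 2) ((d.erase m).getD (PySem.Int.floordiv m 2) 0 + c)).insert
    (PySem.Int.floordiv (m - 1) 2)
    (((d.erase m).insert (PySem.Int.floordiv m 2) ((d.erase m).getD (PySem.Int.floordiv m 2) 0 + c)).getD
      (PySem.Int.floordiv (m - 1) 2) 0 + c)

theorem partitionA_eq (m : Int) : partitionA m = (PySem.Int.floordiv m 2, PySem.Int.floordiv (m - 1) 2) := by
  unfold partitionA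
  rw [PySem.Int.floordiv_eq_ediv_of_pos (by norm_num), PySem.Int.floordiv_eq_ediv_of_pos (by norm_num),
      PySem.Int.mod_eq_emod_of_pos (by norm_num)]
  split_ifs with h
  · simp only [beq_iff_eq] at h
    have : m / 2 - 1 = (m - 1) / 2 := by omega
    rw [this]
  · simp only [beq_iff_eq] at h
    have : (m - 1) / 2 = m / 2 := by omega
    rw [this]

theorem find?_filter_ne (k x : Int) (l : List (Int × Int)) :
    (l.filter (fun p => !(p.1 == k))).find? (fun p => p.1 == x) =
      if x = k then none else l.find? (fun p => p.1 == x) := by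
  induction l with
  | nil => simp
  | cons p t ih =>
    rw [List.filter_cons]
    by_cases hpk : p.1 = k
    · simp only [hpk, beq_self_eq_true, Bool.not_true, if_neg (Bool.false_ne_true)]
      rw [ih]
      split_ifs with hxk
      · rfl
      · rw [List.find?_cons]
        have hb : (p.1 == x) = false := by rw [beq_eq_false_iff_ne]; omega
        rw [hb]
    · have hb : (!(p.1 == k)) = true := by simp [hpk]
      rw [if_pos hb, List.find?_cons, List.find?_cons]
      by_cases hpx : p.1 = x
      · have hb2 : (p.1 == x) = true := by simp [hpx]
        rw [hb2]
        split_ifs with hxk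
        · omega
        · rfl
      · have hb2 : (p.1 == x) = false := by simp [hpx]
        rw [hb2, ih]

theorem get?_erase (d : PySem.Dict Int Int) (k x : Int) :
    (d.erase k).get? x = if x = k then none else d.get? x := by
  obtain ⟨l⟩ := d
  show Option.map _ ((l.filter _).find? _) = _
  rw [find?_filter_ne]
  split_ifs <;> rfl

theorem mem_keys_iff_isSome (d : PySem.Dict Int Int) (x : Int) :
    x ∈ d.keys ↔ (d.get? x).isSome := by
  rw [← not_iff_not]
  simp [← PySem.Dict.get?_eq_none_iff_not_mem_keys, Option.isSome_iff_ne_none]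

theorem maxK_char {d : PySem.Dict Int Int} {m : Int} (hm : m ∈ d.keys)
    (hub : ∀ y ∈ d.keys, y ≤ m) : maxK d = some m := by
  cases h : maxK d with
  | none => rw [maxK, PySem.List.max?_eq_none_iff] at h; simp [h] at hm
  | some m' =>
    have h1 := PySem.List.max?_mem h
    have h2 := PySem.List.max?_isMax h m hm
    have h3 : m ≤ m' := by simpa using h2
    have h4 : m' = m := le_antisymm (hub m' h1) h3
    rw [h4]

theorem maxK_ext {d d' : PySem.Dict Int Int} (h : ∀ x, d.get? x = d'.get? x) :
    maxK d = maxK d' := by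
  have hk : ∀ x, x ∈ d.keys ↔ x ∈ d'.keys := by
    intro x; rw [mem_keys_iff_isSome, mem_keys_iff_isSome, h]
  cases hd : maxK d with
  | none =>
    rw [maxK, PySem.List.max?_eq_none_iff] at hd
    cases hd' : maxK d' with
    | none => rfl
    | some m' =>
      have := PySem.List.max?_mem hd'
      rw [← hk] at this; simp [hd] at this
  | some m =>
    have h1 := PySem.List.max?_mem hd
    have h2 := PySem.List.max?_isMax hd
    exact (maxK_char ((hk m).1 h1) (fun y hy => by simpa using h2 y ((hk y).2 hy))).symm

theorem step_char {d : PySem.Dict Int Int} {m : Int} (h : maxK d = some m) (x : Int) :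
    (sd d).get? x = g4 d m x := by
  have hmax : PySem.List.max? d.keys (fun x => x) = some m := h
  simp only [sd, stepA, hmax, partitionA_eq]
  simp only [PySem.Dict.getD, PySem.Dict.get?_insert, get?_erase]
  unfold g4 g3 g2
  simp only [PySem.Dict.getD]
  by_cases h1 : d.getD m 0 - 1 = 0 <;>
    simp only [PySem.Dict.getD, beq_iff_eq] at h1 ⊢ <;>
    split_ifs <;>
    simp_all [PySem.Dict.get?_insert, get?_erase]

theorem maxFacts {d : PySem.Dict Int Int} (hI : DInv d) :
    ∃ m c, maxK d = some m ∧ d.get? m = some c ∧ 1 ≤ c ∧ -1 ≤ m := by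
  obtain ⟨⟨x, hx⟩, hb⟩ := hI
  cases h : maxK d with
  | none =>
    rw [maxK, PySem.List.max?_eq_none_iff] at h
    exfalso
    have := (mem_keys_iff_isSome d x).2 hx
    simp [h] at this
  | some m =>
    have hmem := PySem.List.max?_mem h
    rw [mem_keys_iff_isSome] at hmem
    obtain ⟨c, hc⟩ := Option.isSome_iff_exists.1 hmem
    obtain ⟨h1, h2⟩ := hb m c hc
    exact ⟨m, c, rfl, hc, h1, h2⟩

theorem stepA_eq {d : PySem.Dict Int Int} {m : Int} (h : maxK d = some m)
    (o : Option (Int × Int)) : stepA (d, o) = (sd d, some (partitionA m)) := by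
  have h' : PySem.List.max? d.keys (fun x => x) = some m := h
  simp only [stepA, sd, h']

theorem getD_nonneg {d : PySem.Dict Int Int} (hI : DInv d) (x : Int) : 0 ≤ d.getD x 0 := by
  rcases h : d.get? x with _ | v
  · simp [PySem.Dict.getD, h]
  · have := (hI.2 x v h).1
    simp [PySem.Dict.getD, h]; omega

theorem fd2_lb {m : Int} (h : -1 ≤ m) : -1 ≤ PySem.Int.floordiv m 2 ∧ -1 ≤ PySem.Int.floordiv (m - 1) 2 := by
  rw [PySem.Int.floordiv_eq_ediv_of_pos (by norm_num), PySem.Int.floordiv_eq_ediv_of_pos (by norm_num)]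
  omega

theorem inv_sd {d : PySem.Dict Int Int} (hI : DInv d) : DInv (sd d) := by
  obtain ⟨m, c, hm, hgm, hc1, hm1⟩ := maxFacts hI
  have hgD : d.getD m 0 = c := by simp [PySem.Dict.getD, hgm]
  obtain ⟨hl, hr⟩ := fd2_lb hm1
  have hnn' : ∀ y, 0 ≤ (d.get? y).getD 0 := by
    intro y; have := getD_nonneg hI y; simpa [PySem.Dict.getD] using this
  constructor
  · exact ⟨PySem.Int.floordiv (m - 1) 2, by rw [step_char hm]; simp [g4]⟩
  · intro x v hx
    rw [step_char hm] at hx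
    unfold g4 g3 g2 at hx
    simp only [PySem.Dict.getD] at hx hgD
    have e1 := hnn' (PySem.Int.floordiv m 2)
    have e2 := hnn' (PySem.Int.floordiv (m - 1) 2)
    split_ifs at hx
    all_goals try exact hI.2 x v hx
    all_goals injection hx with hv
    all_goals try simp only [Option.getD_some, Option.getD_none] at hv
    all_goals constructor <;> omega

theorem g4_ext {d d' : PySem.Dict Int Int} (m : Int) (h : ∀ x, d.get? x = d'.get? x) (x : Int) :
    g4 d m x = g4 d' m x := by
  have hD : ∀ y, d.getD y 0 = d'.getD y 0 := by intro y; simp [PySem.Dict.getD, h y]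
  unfold g4 g3 g2
  simp only [h, hD]

theorem sd_ext {d d' : PySem.Dict Int Int} (h : ∀ x, d.get? x = d'.get? x) :
    ∀ x, (sd d).get? x = (sd d').get? x := by
  intro x
  have hmax : maxK d = maxK d' := maxK_ext h
  cases hm : maxK d with
  | none =>
    have hm' : maxK d' = none := hmax ▸ hm
    have e1 : sd d = d := by simp [sd, stepA, show PySem.List.max? d.keys (fun x => x) = none from hm]
    have e2 : sd d' = d' := by simp [sd, stepA, show PySem.List.max? d'.keys (fun x => x) = none from hm']
    rw [e1, e2, h]
  | some m =>
    have hm' : maxK d' = some m := hmax ▸ hm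
    rw [step_char hm, step_char hm', g4_ext m h]

theorem iter_ext {d d' : PySem.Dict Int Int} (h : ∀ x, d.get? x = d'.get? x) (j : Nat) :
    ∀ x, (sd^[j] d).get? x = (sd^[j] d').get? x := by
  induction j generalizing d d' with
  | zero => simpa using h
  | succ j ih =>
    rw [Function.iterate_succ_apply, Function.iterate_succ_apply]
    exact ih (sd_ext h)

theorem pair_iter {j : Nat} : ∀ (d : PySem.Dict Int Int) (o : Option (Int × Int)), DInv d →
    stepA^[j + 1] (d, o) = (sd^[j + 1] d, (maxK (sd^[j] d)).map partitionA) := by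
  induction j with
  | zero =>
    intro d o hI
    obtain ⟨m, c, hm, -, -, -⟩ := maxFacts hI
    simp [stepA_eq hm o, hm]
  | succ j ih =>
    intro d o hI
    obtain ⟨m, c, hm, -, -, -⟩ := maxFacts hI
    rw [show j + 1 + 1 = (j + 1) + 1 from rfl, Function.iterate_succ_apply, stepA_eq hm o]
    rw [ih (sd d) (some (partitionA m)) (inv_sd hI)]
    rw [← Function.iterate_succ_apply, ← Function.iterate_succ_apply]

theorem sd_get?_eq {d : PySem.Dict Int Int} {m : Int} (hm : maxK d = some m) :
    ∀ x, (sd d).get? x = g4 d m x := step_char hm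

theorem stay : ∀ (j : Nat) (d : PySem.Dict Int Int) (m : Int), DInv d → maxK d = some m →
    ((1 ≤ m ∧ (j : Int) < d.getD m 0) ∨ m ≤ 0) → maxK (sd^[j] d) = some m := by
  intro j
  induction j with
  | zero => intro d m _ hm _; simpa using hm
  | succ j ih =>
    intro d m hI hm hcond
    obtain ⟨m', c, hm', hgm, hc1, hm1⟩ := maxFacts hI
    rw [hm] at hm'
    obtain rfl := (Option.some.inj hm')
    have hgD : d.getD m 0 = c := by simp [PySem.Dict.getD, hgm]
    have hL : PySem.Int.floordiv m 2 = m / 2 := PySem.Int.floordiv_eq_ediv_of_pos (by norm_num)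
    have hR : PySem.Int.floordiv (m - 1) 2 = (m - 1) / 2 := PySem.Int.floordiv_eq_ediv_of_pos (by norm_num)
    have hub : ∀ y ∈ (sd d).keys, y ≤ m := by
      intro y hy
      rw [mem_keys_iff_isSome, sd_get?_eq hm] at hy
      unfold g4 g3 g2 at hy
      split_ifs at hy <;>
        first
          | omega
          | (have hmem : y ∈ d.keys := (mem_keys_iff_isSome d y).2 hy
             have := PySem.List.max?_isMax hm y hmem
             simpa using this)
    have hmem : m ∈ (sd d).keys := by
      rw [mem_keys_iff_isSome, sd_get?_eq hm]
      unfold g4 g3 g2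
      rcases hcond with ⟨hm2, hj⟩ | hm2
      · have h1 : ¬ (m = PySem.Int.floordiv (m - 1) 2) := by omega
        have h2 : ¬ (m = PySem.Int.floordiv m 2) := by omega
        rw [if_neg h1, if_neg h2, if_pos rfl, hgD, if_neg (by push_cast at hj ⊢; omega)]
        simp
      · by_cases h1 : m = PySem.Int.floordiv (m - 1) 2
        · rw [if_pos h1]; simp
        · have h2 : m = PySem.Int.floordiv m 2 := by omega
          rw [if_neg h1, if_pos h2]; simp
    have hmax' : maxK (sd d) = some m := maxK_char hmem hub
    have hInv' : DInv (sd d) := inv_sd hI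
    have hcond' : (1 ≤ m ∧ ((j : Nat) : Int) < (sd d).getD m 0) ∨ m ≤ 0 := by
      rcases hcond with ⟨hm2, hj⟩ | hm2
      · left
        refine ⟨hm2, ?_⟩
        have hval : (sd d).get? m = some (c - 1) := by
          rw [sd_get?_eq hm]
          unfold g4 g3 g2
          rw [if_neg (by omega), if_neg (by omega), if_pos rfl, hgD, if_neg (by push_cast at hj; omega)]
        have : (sd d).getD m 0 = c - 1 := by simp [PySem.Dict.getD, hval]
        rw [this]; push_cast at hj ⊢; omega
      · right; exact hm2
    rw [Function.iterate_succ_apply]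
    exact ih (sd d) m hInv' hmax' hcond'

theorem get?_batchD (d : PySem.Dict Int Int) (m c x : Int) :
    (batchD d m c).get? x =
      (let ls := PySem.Int.floordiv m 2
       let rs := PySem.Int.floordiv (m - 1) 2
       let e : Int → Option Int := fun y => if y = m then none else d.get? y
       let f : Int → Option Int := fun y => if y = ls then some ((e ls).getD 0 + c) else e y
       if x = rs then some ((f rs).getD 0 + c) else f x) := by
  unfold batchD
  simp only [PySem.Dict.getD, PySem.Dict.get?_insert, get?_erase]

theorem batch : ∀ (cn : Nat) (d : PySem.Dict Int Int) (m : Int), DInv d → maxK d = some m → 1 ≤ m →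
    d.getD m 0 = (cn : Int) → 1 ≤ cn → ∀ x,
    (sd^[cn] d).get? x = (batchD d m (cn : Int)).get? x := by
  intro cn
  induction cn with
  | zero => omega
  | succ cn ih =>
    intro d m hI hm hm1 hgD hcn x
    have hL : PySem.Int.floordiv m 2 = m / 2 := PySem.Int.floordiv_eq_ediv_of_pos (by norm_num)
    have hR : PySem.Int.floordiv (m - 1) 2 = (m - 1) / 2 := PySem.Int.floordiv_eq_ediv_of_pos (by norm_num)
    rcases Nat.eq_zero_or_pos cn with hcn0 | hcnpos
    · -- c = 1: a single A-step is the whole batch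
      subst hcn0
      rw [Function.iterate_one, step_char hm, get?_batchD]
      unfold g4 g3 g2
      simp only [hgD]
      split_ifs <;> simp_all
    · -- c = cn + 1 ≥ 2: one A-step, then a batch of cn on (sd d)
      rw [Function.iterate_succ_apply]
      have hm' : maxK (sd d) = some m :=
        stay 1 d m hI hm (Or.inl ⟨hm1, by rw [hgD]; push_cast; omega⟩)
      have hval : (sd d).get? m = some ((cn : Int)) := by
        rw [step_char hm]
        unfold g4 g3 g2
        rw [if_neg (by omega), if_neg (by omega), if_pos rfl, hgD,
            if_neg (by push_cast; omega)]
        norm_num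
      have hgD' : (sd d).getD m 0 = (cn : Int) := by simp [PySem.Dict.getD, hval]
      rw [ih (sd d) m (inv_sd hI) hm' hm1 hgD' hcnpos x]
      rw [get?_batchD, get?_batchD]
      simp only [step_char hm]
      unfold g4 g3 g2
      simp only [hgD]
      push_cast
      split_ifs <;> simp_all <;> omega

theorem inv_batch {d : PySem.Dict Int Int} {m c : Int} (hI : DInv d) (hm1 : 1 ≤ m) (hc : 1 ≤ c) :
    DInv (batchD d m c) := by
  have hL : PySem.Int.floordiv m 2 = m / 2 := PySem.Int.floordiv_eq_ediv_of_pos (by norm_num)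
  have hR : PySem.Int.floordiv (m - 1) 2 = (m - 1) / 2 := PySem.Int.floordiv_eq_ediv_of_pos (by norm_num)
  have hnn' : ∀ y, 0 ≤ (d.get? y).getD 0 := by
    intro y
    rcases h : d.get? y with _ | v
    · simp
    · have := (hI.2 y v h).1; simp; omega
  constructor
  · exact ⟨PySem.Int.floordiv (m - 1) 2, by rw [get?_batchD]; simp⟩
  · intro x v hx
    rw [get?_batchD] at hx
    simp only at hx
    have e1 := hnn' (PySem.Int.floordiv m 2)
    have e2 := hnn' (PySem.Int.floordiv (m - 1) 2)
    split_ifs at hx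
    all_goals try exact hI.2 x v hx
    all_goals injection hx with hv
    all_goals try simp only [Option.getD_some, Option.getD_none] at hv
    all_goals constructor <;> omega

theorem main : ∀ (fuel : Nat) (d : PySem.Dict Int Int) (k : Int), DInv d → 1 ≤ k → k.toNat ≤ fuel →
    ∃ m, maxK (sd^[k.toNat - 1] d) = some m ∧
      solveB fuel d k = [PySem.Int.floordiv m 2, PySem.Int.floordiv (m - 1) 2] := by
  intro fuel
  induction fuel with
  | zero => intro d k _ hk hf; omega
  | succ fuel ih =>
    intro d k hI hk hf
    obtain ⟨m, c, hm, hgm, hc1, hm1⟩ := maxFacts hI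
    have hgD : d.getD m 0 = c := by simp [PySem.Dict.getD, hgm]
    have hm' : PySem.List.max? d.keys (fun x => x) = some m := hm
    by_cases hbr : k ≤ d.getD m 0 ∨ m ≤ 0
    · refine ⟨m, ?_, ?_⟩
      · apply stay (k.toNat - 1) d m hI hm
        rcases hbr with hbr | hbr
        · by_cases hm0 : m ≤ 0
          · exact Or.inr hm0
          · exact Or.inl ⟨by omega, by omega⟩
        · exact Or.inr hbr
      · simp only [solveB, hm']
        rw [if_pos hbr]
    · push_neg at hbr
      obtain ⟨hck, hm0⟩ := hbr
      rw [hgD] at hck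
      set cn : Nat := c.toNat with hcn
      have hcInt : (cn : Int) = c := by omega
      have hbatch : ∀ x, (sd^[cn] d).get? x = (batchD d m c).get? x := by
        intro x
        have := batch cn d m hI hm (by omega) (by rw [hgD, hcInt]) (by omega) x
        rwa [hcInt] at this
      have hIH := ih (batchD d m c) (k - c) (inv_batch hI (by omega) (by omega))
        (by omega) (by omega)
      obtain ⟨μ, hμ, hsolve⟩ := hIH
      refine ⟨μ, ?_, ?_⟩
      · have hsplit : k.toNat - 1 = ((k - c).toNat - 1) + cn := by omega
        rw [hsplit, Function.iterate_add_apply]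
        calc maxK (sd^[(k - c).toNat - 1] (sd^[cn] d))
            = maxK (sd^[(k - c).toNat - 1] (batchD d m c)) :=
              maxK_ext (iter_ext hbatch ((k - c).toNat - 1))
          _ = some μ := hμ
      · have hstep : solveB (fuel + 1) d k = solveB fuel (batchD d m c) (k - c) := by
          simp only [solveB, hm']
          rw [if_neg (by rw [hgD]; omega)]
          rw [hgD]
          rfl
        rw [hstep, hsolve]

theorem foldl_const {α : Type} (L : List Int) (f : α → α) (s : α) :
    L.foldl (fun a _ => f a) s = f^[L.length] s := by
  induction L generalizing s with
  | nil => rfl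
  | cons a t ih => simp [List.foldl_cons, ih, Function.iterate_succ_apply]

-- ===== VERDICT (by name: the statement is the Claim_ definition above) =====
theorem left_right_stalls_spec : Claim_equal_left_right_stalls := by
  intro n k _ hpre
  obtain ⟨hn, hk⟩ := hpre
  unfold Spec_left_right_stalls left_right_stalls left_right_stalls_alt
  have hI : DInv (PySem.Dict.empty.insert n 1) := by
    constructor
    · exact ⟨n, by rw [PySem.Dict.get?_insert]; simp⟩
    · intro x v hx
      rw [PySem.Dict.get?_insert] at hx
      split_ifs at hx with h
      · injection hx with hv; constructor <;> omega
      · rw [PySem.Dict.get?_empty] at hx; exact absurd hx (by simp)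
  obtain ⟨m, hmax, hsolve⟩ := main (k.toNat + 1) (PySem.Dict.empty.insert n 1) k hI hk (by omega)
  rw [hsolve]
  simp only [foldl_const]
  have hlen : (PySem.List.pyRange 0 k 1).length = k.toNat := by
    rw [PySem.List.length_pyRange_one]; norm_num
  rw [hlen, show k.toNat = (k.toNat - 1) + 1 by omega,
      pair_iter (PySem.Dict.empty.insert n 1) none hI, hmax]
  simp [partitionA_eq]
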